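-- pv_equiv track=rewrite | github.com/aakshatm/texgenie-parser | mistuneandNormal.py | array_to_latex
-- ===== SOURCE A (Python) =====
-- def array_to_latex(grid):
--     """
--     Convert a 2D array to LaTeX tabular format with multirow and multicolumn support.
--     """
--     if not grid or not grid[0]:
--         return "\\begin{tabular}{|c|}\\hline\nEmpty Table\\\\\\hline\n\\end{tabular}"
--
--     num_cols = len(grid[0])
--     latex = "\\begin{tabular}{|" + "|".join(["c"] * num_cols) + "|}\\hline\n"
--
--     for row_idx, row in enumerate(grid):
--         cells = []
--         col_idx = 0
--         skip_hline = any(cell == "up" for cell in row)  # Skip \hline if row contains \multirow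
--
--         while col_idx < num_cols:
--             cell = row[col_idx]
--             if cell is None:
--                 cells.append("")
--                 col_idx += 1
--                 continue
--             elif cell == "up":
--                 cells.append(" ")  # Ensure empty space for row merging
--                 col_idx += 1
--                 continue
--             elif cell == "left":
--                 col_idx += 1
--                 continue
--             else:
--                 # Count colspan
--                 colspan = 1
--                 while col_idx + colspan < num_cols and row[col_idx + colspan] == "left":
--                     colspan += 1
--
--                 # Count rowspan
--                 rowspan = 1
--                 while row_idx + rowspan < len(grid) and grid[row_idx + rowspan][col_idx] == "up":
--                     rowspan += 1
--
--                 # Apply LaTeX multirow and multicolumn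
--                 if col_idx == 0:
--                     ch = "|"
--                 else:
--                     ch = ""
--
--                 if rowspan > 1 and colspan > 1:
--                     cell_text = f"\\multicolumn{{{colspan}}}{{{ch}c|}}{{\\multirow{{{rowspan}}}{{*}}{{{cell}}}}}"
--                 elif rowspan > 1:
--                     cell_text = f"\\multirow{{{rowspan}}}{{*}}{{{cell}}}"
--                 elif colspan > 1:
--                     cell_text = f"\\multicolumn{{{colspan}}}{{{ch}c|}}{{{cell}}}"
--                 else:
--                     cell_text = cell
--
--                 cells.append(cell_text)
--                 col_idx += colspan
--
--         latex += " & ".join(cells) + " \\\\ "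
--
--         # Add \hline only if the next row doesn't contain "up" (multirow continuation)
--         if row_idx + 1 < len(grid) and "up" not in grid[row_idx + 1]:
--             latex += "\\hline\n"
--         elif row_idx + 1 == len(grid):
--             latex += "\\hline\n"
--         else:
--             # Determine the valid range for \cline
--             start_col, last_col = 0, num_cols - 1
--             while start_col < num_cols and grid[row_idx + 1][start_col] == "up":
--                 start_col += 1
--             while last_col > 0 and grid[row_idx + 1][last_col] == "up":
--                 last_col -= 1
--
--             if start_col <= last_col:
--                 latex += f"\\cline{{{start_col + 1}-{last_col + 1}}}\n"
--
--     latex += "\\end{tabular}"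
--     return latex
-- ===== SOURCE B (Python) =====
-- def _lead_up(cells):
--     """Length of the leading run of 'up' cells."""
--     k = 0
--     for c in cells:
--         if c != "up":
--             break
--         k += 1
--     return k
--
--
-- def _sep_below(nxt, n):
--     """Separator printed after the row directly above `nxt`."""
--     if "up" not in nxt:
--         return "\\hline\n"
--     first = _lead_up(nxt[:n])
--     last = n - 1 - min(_lead_up(nxt[:n][::-1]), n - 1)
--     if first <= last:
--         return f"\\cline{{{first + 1}-{last + 1}}}\n"
--     return ""
--
--
-- def _render(cell, rowspan, colspan, at_first_col):
--     body = f"\\multirow{{{rowspan}}}{{*}}{{{cell}}}" if rowspan > 1 else cell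
--     if colspan > 1:
--         ch = "|" if at_first_col else ""
--         return f"\\multicolumn{{{colspan}}}{{{ch}c|}}{{{body}}}"
--     return body
--
--
-- def array_to_latex(grid):
--     if not grid or not grid[0]:
--         return "\\begin{tabular}{|c|}\\hline\nEmpty Table\\\\\\hline\n\\end{tabular}"
--     n = len(grid[0])
--     up_runs = [0] * n   # per column: leading 'up' run of the rows already rendered (below)
--     sep = "\\hline\n"   # separator that follows the row currently being rendered
--     out = []            # row strings, collected bottom-up
--     for row in reversed(grid):
--         cells = []
--         left_run = 0    # length of the 'left' run immediately right of the current cell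
--         for c in range(n - 1, -1, -1):
--             cell = row[c]
--             if cell == "left":
--                 left_run += 1
--                 continue
--             if cell is None:
--                 cells.append("")
--             elif cell == "up":
--                 cells.append(" ")
--             else:
--                 cells.append(_render(cell, 1 + up_runs[c], 1 + left_run, c == 0))
--             left_run = 0
--         cells.reverse()
--         out.append(" & ".join(cells) + " \\\\ " + sep)
--         sep = _sep_below(row, n)
--         up_runs = [u + 1 if cell == "up" else 0 for cell, u in zip(row[:n], up_runs)]
--     out.reverse()
--     return ("\\begin{tabular}{|" + "|".join(["c"] * n) + "|}\\hline\n"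
--             + "".join(out) + "\\end{tabular}")
-- ===== Notes on version B (the rewrite author's own statement) =====
-- stated objective: alternative
-- what changed: A scans top-down with an index-jumping while loop and nested rescans for each cell's colspan/rowspan and for the next-row separator; B makes a single bottom-up pass over the rows carrying a per-column 'up'-run accumulator (rowspan = 1 + accumulator, no downward rescan) and renders each row right-to-left carrying a 'left'-run accumulator (colspan = 1 + accumulator, no rightward rescan), collecting row strings in a list joined at the end.
import Mathlib
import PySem

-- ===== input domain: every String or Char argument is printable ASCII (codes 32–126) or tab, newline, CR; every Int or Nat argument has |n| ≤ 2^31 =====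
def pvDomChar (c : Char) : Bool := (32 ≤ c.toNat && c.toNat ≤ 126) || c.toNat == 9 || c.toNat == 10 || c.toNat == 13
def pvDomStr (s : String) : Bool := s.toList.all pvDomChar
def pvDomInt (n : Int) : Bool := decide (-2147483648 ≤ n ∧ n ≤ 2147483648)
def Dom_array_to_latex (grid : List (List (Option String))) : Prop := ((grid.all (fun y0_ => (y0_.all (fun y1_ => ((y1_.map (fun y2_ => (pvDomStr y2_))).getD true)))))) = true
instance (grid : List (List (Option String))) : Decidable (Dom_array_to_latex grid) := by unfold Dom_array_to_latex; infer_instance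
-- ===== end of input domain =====

-- B replaces A's top-down index-jumping scan with nested span rescans by a single bottom-up
-- pass carrying a per-column 'up'-run accumulator and a right-to-left per-row pass carrying a
-- 'left'-run accumulator (objective: alternative decomposition, no rescans).

-- ===== PORT A =====

def pyJoin (sep : String) : List String → String
  | [] => ""
  | [x] => x
  | x :: y :: t => x ++ sep ++ pyJoin sep (y :: t)

def cellTextA (rowspan colspan : Nat) (c : Nat) (cell : String) : String :=
  let ch := if c = 0 then "|" else ""
  if rowspan > 1 ∧ colspan > 1 then
    "\\multicolumn{" ++ toString colspan ++ "}{" ++ ch ++ "c|}{\\multirow{" ++ toString rowspan ++ "}{*}{" ++ cell ++ "}}"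
  else if rowspan > 1 then
    "\\multirow{" ++ toString rowspan ++ "}{*}{" ++ cell ++ "}"
  else if colspan > 1 then
    "\\multicolumn{" ++ toString colspan ++ "}{" ++ ch ++ "c|}{" ++ cell ++ "}"
  else cell

-- while col_idx + colspan < num_cols and row[col_idx + colspan] == "left": colspan += 1
def colspanLoopA (row : List (Option String)) (n c k : Nat) : Nat :=
  if h : c + k < n ∧ row.getD (c + k) none = some "left" then colspanLoopA row n c (k + 1) else k
termination_by n - (c + k)
decreasing_by omega

-- while row_idx + rowspan < len(grid) and grid[row_idx + rowspan][col_idx] == "up": rowspan += 1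
def rowspanLoopA (grid : List (List (Option String))) (r c k : Nat) : Nat :=
  if h : r + k < grid.length ∧ (grid.getD (r + k) []).getD c none = some "up" then
    rowspanLoopA grid r c (k + 1)
  else k
termination_by grid.length - (r + k)
decreasing_by omega

theorem colspanLoopA_ge (row : List (Option String)) (n c k : Nat) : k ≤ colspanLoopA row n c k := by
  fun_induction colspanLoopA with
  | case1 => omega
  | case2 => omega

-- the inner 'while col_idx < num_cols' loop building 'cells'
def cellsLoopA (grid : List (List (Option String))) (row : List (Option String)) (r n c : Nat) :
    List String :=
  if h : c < n then
    match row.getD c none with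
    | none => "" :: cellsLoopA grid row r n (c + 1)
    | some cell =>
      if cell = "up" then " " :: cellsLoopA grid row r n (c + 1)
      else if cell = "left" then cellsLoopA grid row r n (c + 1)
      else
        let colspan := colspanLoopA row n c 1
        let rowspan := rowspanLoopA grid r c 1
        have hcs : 1 ≤ colspan := colspanLoopA_ge row n c 1
        cellTextA rowspan colspan c cell :: cellsLoopA grid row r n (c + colspan)
  else []
termination_by n - c
decreasing_by all_goals omega

def startColLoopA (nxt : List (Option String)) (n s : Nat) : Nat :=
  if h : s < n ∧ nxt.getD s none = some "up" then startColLoopA nxt n (s + 1) else s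
termination_by n - s
decreasing_by omega

def lastColLoopA (nxt : List (Option String)) (l : Nat) : Nat :=
  if h : 0 < l ∧ nxt.getD l none = some "up" then lastColLoopA nxt (l - 1) else l
termination_by l
decreasing_by omega

-- the separator appended after row r
def sepA (grid : List (List (Option String))) (n r : Nat) : String :=
  if r + 1 < grid.length ∧ ¬ some "up" ∈ grid.getD (r + 1) [] then "\\hline\n"
  else if r + 1 = grid.length then "\\hline\n"
  else
    let nxt := grid.getD (r + 1) []
    let s := startColLoopA nxt n 0
    let l := lastColLoopA nxt (n - 1)
    if s ≤ l then "\\cline{" ++ toString (s + 1) ++ "-" ++ toString (l + 1) ++ "}\n" else ""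

def rowsLoopA (grid : List (List (Option String))) (n r : Nat) (acc : String) : String :=
  if h : r < grid.length then
    rowsLoopA grid n (r + 1)
      (acc ++ pyJoin " & " (cellsLoopA grid (grid.getD r []) r n 0) ++ " \\\\ " ++ sepA grid n r)
  else acc
termination_by grid.length - r
decreasing_by omega

def array_to_latex (grid : List (List (Option String))) : String :=
  if grid = [] ∨ grid.headD [] = [] then
    "\\begin{tabular}{|c|}\\hline\nEmpty Table\\\\\\hline\n\\end{tabular}"
  else
    rowsLoopA grid (grid.headD []).length 0
      ("\\begin{tabular}{|" ++ pyJoin "|" (List.replicate (grid.headD []).length "c") ++ "|}\\hline\n")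
      ++ "\\end{tabular}"

-- ===== PORT B =====

-- _render: multirow body wrapped in multicolumn when the spans exceed 1
def renderB (cell : String) (rowspan colspan : Nat) (atFirstCol : Bool) : String :=
  let body :=
    if rowspan > 1 then "\\multirow{" ++ toString rowspan ++ "}{*}{" ++ cell ++ "}" else cell
  if colspan > 1 then
    let ch := if atFirstCol then "|" else ""
    "\\multicolumn{" ++ toString colspan ++ "}{" ++ ch ++ "c|}{" ++ body ++ "}"
  else body

-- _lead_up: length of the leading run of 'up' cells
def leadUpB : List (Option String) → Nat
  | [] => 0
  | x :: xs => if x = some "up" then leadUpB xs + 1 else 0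

-- _sep_below: separator printed after the row directly above `nxt`
def sepBelowB (nxt : List (Option String)) (n : Nat) : String :=
  if some "up" ∈ nxt then
    let first := leadUpB (nxt.take n)
    let last := n - 1 - min (leadUpB (nxt.take n).reverse) (n - 1)
    if first ≤ last then
      "\\cline{" ++ toString (first + 1) ++ "-" ++ toString (last + 1) ++ "}\n"
    else ""
  else "\\hline\n"

-- the right-to-left cell pass: result = ('left'-run at the front of the suffix, rendered cells)
def cellsB (c : Nat) : List (Option String) → List Nat → Nat × List String
  | [], _ => (0, [])
  | x :: xs, ups =>
    let p := cellsB (c + 1) xs ups.tail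
    if x = some "left" then (p.1 + 1, p.2)
    else
      match x with
      | none => (0, "" :: p.2)
      | some cell =>
        if cell = "up" then (0, " " :: p.2)
        else (0, renderB cell (1 + ups.headD 0) (1 + p.1) (c == 0) :: p.2)

-- the bottom-up pass over the rows ('for row in reversed(grid)'):
-- returns (per-column leading 'up' runs, separator following the row above, row strings)
def buildB (n : Nat) : List (List (Option String)) → List Nat × String × List String
  | [] => (List.replicate n 0, "\\hline\n", [])
  | row :: rest =>
    let p := buildB n rest
    (List.zipWith (fun cell u => if cell = some "up" then u + 1 else 0) (row.take n) p.1,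
     sepBelowB row n,
     (PySem.Str.join " & " (cellsB 0 (row.take n) p.1).2 ++ " \\\\ " ++ p.2.1) :: p.2.2)

def array_to_latex_alt (grid : List (List (Option String))) : String :=
  if grid = [] ∨ grid.headD [] = [] then
    "\\begin{tabular}{|c|}\\hline\nEmpty Table\\\\\\hline\n\\end{tabular}"
  else
    "\\begin{tabular}{|"
      ++ PySem.Str.join "|" (List.replicate (grid.headD []).length "c") ++ "|}\\hline\n"
      ++ PySem.Str.join "" (buildB (grid.headD []).length grid).2.2
      ++ "\\end{tabular}"

-- ===== PRECONDITION & SPEC =====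
-- Pre_ excludes exactly the grids on which A raises IndexError: some row shorter than grid[0]
-- (every index 0..len(grid[0])-1 of every row is read by A's loops).
def Pre_array_to_latex (grid : List (List (Option String))) : Prop :=
  ∀ row ∈ grid, (grid.headD []).length ≤ row.length

instance (grid : List (List (Option String))) : Decidable (Pre_array_to_latex grid) := by
  unfold Pre_array_to_latex; infer_instance

def pvWitness_array_to_latex : List (List (Option String)) :=
  [[some "A", some "left"], [some "up", some "b"]]

def Spec_array_to_latex (grid : List (List (Option String))) (out : String) : Prop :=
  out = array_to_latex_alt grid
instance (grid : List (List (Option String))) (out : String) :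
    Decidable (Spec_array_to_latex grid out) := by unfold Spec_array_to_latex; infer_instance

-- ===== CLAIM (what is proved, stated in full; the proofs are below) =====
def Claim_equal_array_to_latex : Prop :=
  ∀ (grid : List (List (Option String))), Dom_array_to_latex grid → Pre_array_to_latex grid →
    Spec_array_to_latex grid (array_to_latex grid)

-- ===== LEMMAS AND PROOFS =====

-- the common run-length spec all the scanning loops reduce to
def runCnt (v : String) : List (Option String) → Nat
  | [] => 0
  | x :: xs => if x = some v then runCnt v xs + 1 else 0

theorem runCnt_le_length (v : String) (l : List (Option String)) : runCnt v l ≤ l.length := by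
  induction l with
  | nil => simp [runCnt]
  | cons x xs ih => simp only [runCnt, List.length_cons]; split <;> omega

theorem runCnt_lt_imp (v : String) (l : List (Option String)) :
    ∀ j, j < runCnt v l → l.getD j none = some v := by
  induction l with
  | nil => simp [runCnt]
  | cons x xs ih =>
    intro j hj
    simp only [runCnt] at hj
    split at hj
    · cases j with
      | zero => simpa using ‹x = some v›
      | succ j => exact ih j (by omega)
    · omega

theorem leadUpB_eq (l : List (Option String)) : leadUpB l = runCnt "up" l := by
  induction l with
  | nil => rfl
  | cons x xs ih => simp [leadUpB, runCnt, ih]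

theorem strJoin_one (sep x : String) : PySem.Str.join sep [x] = x := by
  simp [PySem.Str.join]

theorem strJoin_cons_cons (sep x y : String) (t : List String) :
    PySem.Str.join sep (x :: y :: t) = x ++ sep ++ PySem.Str.join sep (y :: t) := by
  simp [PySem.Str.join, PySem.Chars.join_cons_cons, String.append_assoc]

theorem pyJoin_eq (sep : String) (l : List String) : pyJoin sep l = PySem.Str.join sep l := by
  induction l with
  | nil => rfl
  | cons x t ih =>
    cases t with
    | nil => exact (strJoin_one sep x).symm
    | cons y t2 => rw [pyJoin, strJoin_cons_cons, ih]

theorem take_drop_cons (row : List (Option String)) (n i : Nat) (hn : n ≤ row.length)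
    (hi : i < n) :
    (row.take n).drop i = row.getD i none :: (row.take n).drop (i + 1) := by
  have h1 : i < (row.take n).length := by simp; omega
  rw [← List.getElem_cons_drop (h := h1)]
  congr 1
  rw [List.getElem_take]
  exact (List.getD_eq_getElem _ _ (by omega)).symm

theorem drop_take_nil (row : List (Option String)) (n i : Nat) (h : n ≤ i) :
    (row.take n).drop i = [] :=
  List.drop_of_length_le (by simp; omega)

theorem map_drop_cons (grid : List (List (Option String))) (c i : Nat) (hi : i < grid.length) :
    (grid.map (fun row => row.getD c none)).drop i
      = (grid.getD i []).getD c none :: (grid.map (fun row => row.getD c none)).drop (i + 1) := by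
  have h1 : i < (grid.map (fun row => row.getD c none)).length := by simpa using hi
  rw [← List.getElem_cons_drop (h := h1)]
  congr 1
  simp [List.getD, List.getElem?_eq_getElem hi]

theorem drop_eq_getD_cons (grid : List (List (Option String))) (i : Nat) (hi : i < grid.length) :
    grid.drop i = grid.getD i [] :: grid.drop (i + 1) := by
  rw [← List.getElem_cons_drop (h := hi)]
  congr 1
  exact (List.getD_eq_getElem _ _ hi).symm

theorem colspanLoopA_eq (row : List (Option String)) (n c k : Nat) (h : n ≤ row.length) :
    colspanLoopA row n c k = k + runCnt "left" ((row.take n).drop (c + k)) := by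
  fun_induction colspanLoopA with
  | case1 k hcond ih =>
    obtain ⟨hlt, hv⟩ := hcond
    rw [ih, take_drop_cons row n (c + k) h hlt,
      show c + (k + 1) = c + k + 1 from by omega]
    simp only [runCnt]
    rw [if_pos hv]
    omega
  | case2 k hcond =>
    by_cases hlt : c + k < n
    · have hv : ¬ row.getD (c + k) none = some "left" := fun hv => hcond ⟨hlt, hv⟩
      rw [take_drop_cons row n (c + k) h hlt]
      simp only [runCnt]
      rw [if_neg hv]
      omega
    · rw [drop_take_nil row n (c + k) (by omega)]
      simp [runCnt]

theorem rowspanLoopA_eq (grid : List (List (Option String))) (r c k : Nat) :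
    rowspanLoopA grid r c k
      = k + runCnt "up" ((grid.map (fun row => row.getD c none)).drop (r + k)) := by
  fun_induction rowspanLoopA with
  | case1 k hcond ih =>
    obtain ⟨hlt, hv⟩ := hcond
    rw [ih, map_drop_cons grid c (r + k) hlt,
      show r + (k + 1) = r + k + 1 from by omega]
    simp only [runCnt]
    rw [if_pos hv]
    omega
  | case2 k hcond =>
    by_cases hlt : r + k < grid.length
    · have hv : ¬ (grid.getD (r + k) []).getD c none = some "up" := fun hv => hcond ⟨hlt, hv⟩
      rw [map_drop_cons grid c (r + k) hlt]
      simp only [runCnt]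
      rw [if_neg hv]
      omega
    · rw [List.drop_of_length_le (by simp; omega)]
      simp [runCnt]

theorem startColLoopA_eq (nxt : List (Option String)) (n s : Nat) (h : n ≤ nxt.length) :
    startColLoopA nxt n s = s + runCnt "up" ((nxt.take n).drop s) := by
  fun_induction startColLoopA with
  | case1 s hcond ih =>
    obtain ⟨hlt, hv⟩ := hcond
    rw [ih,
      show (nxt.take n).drop s = nxt.getD s none :: (nxt.take n).drop (s + 1) from by
        have := take_drop_cons nxt n s h hlt; simpa using this]
    simp only [runCnt]
    rw [if_pos hv]
    omega
  | case2 s hcond =>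
    by_cases hlt : s < n
    · have hv : ¬ nxt.getD s none = some "up" := fun hv => hcond ⟨hlt, hv⟩
      rw [show (nxt.take n).drop s = nxt.getD s none :: (nxt.take n).drop (s + 1) from by
        have := take_drop_cons nxt n s h hlt; simpa using this]
      simp only [runCnt]
      rw [if_neg hv]
      omega
    · rw [drop_take_nil nxt n s (by omega)]
      simp [runCnt]

theorem reverse_take_succ (nxt : List (Option String)) (l : Nat) (hl : l < nxt.length) :
    (nxt.take (l + 1)).reverse = nxt.getD l none :: (nxt.take l).reverse := by
  have ht : nxt.take (l + 1) = nxt.take l ++ [nxt.getD l none] := by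
    rw [List.take_add_one, List.getElem?_eq_getElem hl]
    simp [List.getD, List.getElem?_eq_getElem hl]
  rw [ht]
  simp

theorem lastColLoopA_eq (nxt : List (Option String)) (l : Nat) (h : l < nxt.length) :
    lastColLoopA nxt l = l - min (runCnt "up" ((nxt.take (l + 1)).reverse)) l := by
  induction l using Nat.strong_induction_on with
  | _ l ih =>
    rw [lastColLoopA]
    split
    · next hc =>
      obtain ⟨hl0, hv⟩ := hc
      rw [ih (l - 1) (by omega) (by omega), reverse_take_succ nxt l h,
        show l - 1 + 1 = l from by omega]
      simp only [runCnt]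
      rw [if_pos hv]
      omega
    · next hc =>
      by_cases h0 : l = 0
      · subst h0; simp
      · have hv : ¬ nxt.getD l none = some "up" := fun hv => hc ⟨by omega, hv⟩
        rw [reverse_take_succ nxt l h]
        simp only [runCnt]
        rw [if_neg hv]
        simp

theorem cellsLoopA_eq (grid : List (List (Option String))) (row : List (Option String))
    (r n : Nat) (hrow : n ≤ row.length) (c : Nat) :
    cellsLoopA grid row r n c
      = (List.range' c (n - c)).filterMap (fun c =>
          match row.getD c none with
          | none => some ""
          | some cell =>
            if cell = "up" then some " "
            else if cell = "left" then none
            else some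
                (cellTextA (rowspanLoopA grid r c 1) (colspanLoopA row n c 1) c cell)) := by
  fun_induction cellsLoopA with
  | case1 c hc heq ih =>
    rw [show n - c = (n - (c + 1)) + 1 from by omega, List.range'_succ,
      List.filterMap_cons_some (by rw [heq]), ← ih]
  | case2 c hc heq ih =>
    rw [show n - c = (n - (c + 1)) + 1 from by omega, List.range'_succ,
      List.filterMap_cons_some (by rw [heq]; rfl), ← ih]
  | case3 c hc heq hup ih =>
    rw [show n - c = (n - (c + 1)) + 1 from by omega, List.range'_succ,
      List.filterMap_cons_none (by rw [heq]; rfl), ← ih]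
  | case4 c hc cell heq hup hleft colspan rowspan hcs1 ih =>
    simp only [show colspan = colspanLoopA row n c 1 from rfl,
      show rowspan = rowspanLoopA grid r c 1 from rfl] at ih ⊢
    have hcs : colspanLoopA row n c 1 = 1 + runCnt "left" ((row.take n).drop (c + 1)) :=
      colspanLoopA_eq row n c 1 hrow
    have htle : runCnt "left" ((row.take n).drop (c + 1)) ≤ n - (c + 1) := by
      have h1 := runCnt_le_length "left" ((row.take n).drop (c + 1))
      rw [List.length_drop, List.length_take] at h1
      omega
    rw [show n - c = 1 + (runCnt "left" ((row.take n).drop (c + 1))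
          + (n - (c + 1) - runCnt "left" ((row.take n).drop (c + 1)))) from by omega]
    rw [show List.range' c (1 + (runCnt "left" ((row.take n).drop (c + 1))
          + (n - (c + 1) - runCnt "left" ((row.take n).drop (c + 1)))))
        = List.range' c 1 ++ (List.range' (c + 1) (runCnt "left" ((row.take n).drop (c + 1)))
          ++ List.range' (c + 1 + runCnt "left" ((row.take n).drop (c + 1)))
              (n - (c + 1) - runCnt "left" ((row.take n).drop (c + 1)))) from by
      rw [← List.range'_append_1, ← List.range'_append_1]]
    rw [List.filterMap_append, List.filterMap_append, List.range'_one,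
      List.filterMap_cons_some (by rw [heq]; simp only [if_neg hup, if_neg hleft]; rfl),
      List.filterMap_nil]
    have hmid : (List.range' (c + 1) (runCnt "left" ((row.take n).drop (c + 1)))).filterMap
        (fun c =>
          match row.getD c none with
          | none => some ""
          | some cell =>
            if cell = "up" then some " "
            else if cell = "left" then none
            else some
                (cellTextA (rowspanLoopA grid r c 1) (colspanLoopA row n c 1) c cell)) = [] := by
      rw [List.filterMap_eq_nil_iff]
      intro j hj
      have hjr := List.mem_range'_1.mp hj
      have hv : row.getD j none = some "left" := by
        have h2 := runCnt_lt_imp "left" ((row.take n).drop (c + 1)) (j - (c + 1)) (by omega)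
        have h3 : ((row.take n).drop (c + 1)).getD (j - (c + 1)) none = row.getD j none := by
          have h1 : j - (c + 1) < ((row.take n).drop (c + 1)).length := by simp; omega
          rw [List.getD_eq_getElem _ _ h1, List.getElem_drop, List.getElem_take,
            List.getD_eq_getElem _ _ (by omega)]
          congr 1
          omega
        rw [h3] at h2
        exact h2
      rw [hv]
      simp
    rw [hmid, ih,
      show c + colspanLoopA row n c 1 = c + 1 + runCnt "left" ((row.take n).drop (c + 1)) from by
        omega,
      show n - (c + 1 + runCnt "left" ((row.take n).drop (c + 1)))
          = n - (c + 1) - runCnt "left" ((row.take n).drop (c + 1)) from by omega]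
    simp
  | case5 c hc =>
    rw [show n - c = 0 from by omega]
    simp

theorem cellText_bridge (rs cs c : Nat) (cell : String) :
    cellTextA rs cs c cell = renderB cell rs cs (c == 0) := by
  have h1 : ("c|}{" : String) ++ "\\multirow{" = "c|}{\\multirow{" := rfl
  have h2 : ("}" : String) ++ "}" = "}}" := rfl
  have hch : (if (c == 0) = true then ("|" : String) else "") = if c = 0 then "|" else "" := by
    by_cases h : c = 0 <;> simp [h]
  unfold cellTextA renderB
  rw [hch]
  split_ifs <;> first
    | rfl
    | omega
    | simp only [String.append_assoc, ← h1, ← h2]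

theorem tail_getD (l : List Nat) (j : Nat) : l.tail.getD j 0 = l.getD (j + 1) 0 := by
  cases l <;> simp

theorem cellsB_cons_none (c : Nat) (xs : List (Option String)) (ups : List Nat) :
    cellsB c (none :: xs) ups = (0, "" :: (cellsB (c + 1) xs ups.tail).2) := rfl

theorem cellsB_cons_left (c : Nat) (xs : List (Option String)) (ups : List Nat) :
    cellsB c (some "left" :: xs) ups
      = ((cellsB (c + 1) xs ups.tail).1 + 1, (cellsB (c + 1) xs ups.tail).2) := rfl

theorem cellsB_cons_up (c : Nat) (xs : List (Option String)) (ups : List Nat) :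
    cellsB c (some "up" :: xs) ups = (0, " " :: (cellsB (c + 1) xs ups.tail).2) := by
  simp [cellsB]

theorem cellsB_cons_other (c : Nat) (xs : List (Option String)) (ups : List Nat)
    (cell : String) (hleft : cell ≠ "left") (hup : cell ≠ "up") :
    cellsB c (some cell :: xs) ups
      = (0, renderB cell (1 + ups.headD 0) (1 + (cellsB (c + 1) xs ups.tail).1) (c == 0)
          :: (cellsB (c + 1) xs ups.tail).2) := by
  simp [cellsB, hleft, hup]

theorem cellsB_fst (c : Nat) (l : List (Option String)) (ups : List Nat) :
    (cellsB c l ups).1 = runCnt "left" l := by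
  induction l generalizing c ups with
  | nil => rfl
  | cons x xs ih =>
    simp only [cellsB, runCnt]
    by_cases hx : x = some "left"
    · rw [if_pos hx, if_pos hx, ih]
    · rw [if_neg hx, if_neg hx]
      cases x with
      | none => rfl
      | some cell => by_cases hup : cell = "up" <;> simp [hup]

theorem cellsB_snd (row : List (Option String)) (n : Nat) (hrow : n ≤ row.length)
    (U : Nat → Nat) :
    ∀ d c (ups : List Nat), n - c ≤ d → (∀ j, c + j < n → ups.getD j 0 = U (c + j)) →
    (cellsB c ((row.take n).drop c) ups).2
      = (List.range' c (n - c)).filterMap (fun i =>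
          match row.getD i none with
          | none => some ""
          | some cell =>
            if cell = "up" then some " "
            else if cell = "left" then none
            else some (renderB cell (1 + U i)
                (1 + runCnt "left" ((row.take n).drop (i + 1))) (i == 0))) := by
  intro d
  induction d with
  | zero =>
    intro c ups hd _
    rw [drop_take_nil row n c (by omega), show n - c = 0 from by omega]
    rfl
  | succ d ih =>
    intro c ups hd hU
    by_cases hc : c < n
    · rw [take_drop_cons row n c hrow hc]
      have hups' : ∀ j, (c + 1) + j < n → ups.tail.getD j 0 = U ((c + 1) + j) := by
        intro j hj
        rw [tail_getD]
        have := hU (j + 1) (by omega)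
        rwa [show c + (j + 1) = c + 1 + j from by omega] at this
      have hrec := ih (c + 1) ups.tail (by omega) hups'
      have hfst : (cellsB (c + 1) ((row.take n).drop (c + 1)) ups.tail).1
          = runCnt "left" ((row.take n).drop (c + 1)) := cellsB_fst _ _ _
      have hhead : ups.headD 0 = U c := by
        have := hU 0 (by omega)
        cases ups <;> simpa using this
      rw [show n - c = (n - (c + 1)) + 1 from by omega, List.range'_succ]
      cases hval : row.getD c none with
      | none =>
        rw [cellsB_cons_none, List.filterMap_cons_some (by rw [hval]), hrec]
      | some cell =>
        by_cases hleft : cell = "left"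
        · subst hleft
          rw [cellsB_cons_left, List.filterMap_cons_none (by rw [hval]; rfl)]
          exact hrec
        · by_cases hup : cell = "up"
          · subst hup
            rw [cellsB_cons_up, List.filterMap_cons_some (by rw [hval]; rfl), hrec]
          · rw [cellsB_cons_other _ _ _ _ hleft hup,
              List.filterMap_cons_some
                (by rw [hval]; simp only [if_neg hup, if_neg hleft]; rfl),
              hfst, hhead, hrec]
    · rw [drop_take_nil row n c (by omega), show n - c = 0 from by omega]
      rfl

theorem buildB_ups (grid : List (List (Option String))) (n : Nat)
    (hpre : ∀ row ∈ grid, n ≤ row.length) :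
    ∀ d r, grid.length - r ≤ d →
      (buildB n (grid.drop r)).1.length = n ∧
      (∀ c, c < n → (buildB n (grid.drop r)).1.getD c 0
        = runCnt "up" ((grid.map (fun row => row.getD c none)).drop r)) := by
  intro d
  induction d with
  | zero =>
    intro r hd
    constructor
    · rw [List.drop_of_length_le (by omega)]
      simp [buildB]
    · intro c hc
      rw [List.drop_of_length_le (by omega), List.drop_of_length_le (by simp; omega)]
      simp [buildB, runCnt]
  | succ d ih =>
    intro r hd
    by_cases hr : r < grid.length
    · have hmem : grid.getD r [] ∈ grid := by
        rw [List.getD_eq_getElem _ _ hr]; exact List.getElem_mem hr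
      have hlen : n ≤ (grid.getD r []).length := hpre _ hmem
      obtain ⟨ihlen, ihval⟩ := ih (r + 1) (by omega)
      rw [drop_eq_getD_cons grid r hr]
      simp only [buildB]
      have hlen2 : n ≤ (grid[r]?.getD []).length := hlen
      constructor
      · rw [List.length_zipWith, ihlen, List.length_take]
        omega
      · intro c hc
        have h1 : c < (List.zipWith (fun cell u => if cell = some "up" then u + 1 else 0)
            ((grid.getD r []).take n) (buildB n (grid.drop (r + 1))).1).length := by
          rw [List.length_zipWith, ihlen, List.length_take]; omega
        rw [List.getD_eq_getElem _ _ h1, List.getElem_zipWith]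
        rw [map_drop_cons grid c r hr]
        simp only [runCnt]
        have h2 : ((grid.getD r []).take n)[c]'(by simp; omega)
            = (grid.getD r []).getD c none := by
          rw [List.getElem_take]
          exact List.getD_eq_getElem _ _ (by omega) |>.symm
        rw [h2, ← List.getD_eq_getElem _ _ (by rw [ihlen]; exact hc), ihval c hc]
    · constructor
      · rw [List.drop_of_length_le (by omega)]
        simp [buildB]
      · intro c hc
        rw [List.drop_of_length_le (by omega), List.drop_of_length_le (by simp; omega)]
        simp [buildB, runCnt]

theorem buildB_sep (grid : List (List (Option String))) (n : Nat)
    (hpre : ∀ row ∈ grid, n ≤ row.length) (hn : 1 ≤ n) (r : Nat) (hr : r < grid.length) :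
    (buildB n (grid.drop (r + 1))).2.1 = sepA grid n r := by
  by_cases hend : r + 1 = grid.length
  · rw [List.drop_of_length_le (by omega)]
    unfold sepA
    rw [if_neg (by rintro ⟨h1, _⟩; omega), if_pos hend]
    rfl
  · have hlt : r + 1 < grid.length := by omega
    have hmem : grid.getD (r + 1) [] ∈ grid := by
      rw [List.getD_eq_getElem _ _ hlt]; exact List.getElem_mem hlt
    have hlen : n ≤ (grid.getD (r + 1) []).length := hpre _ hmem
    rw [drop_eq_getD_cons grid (r + 1) hlt]
    show sepBelowB (grid.getD (r + 1) []) n = sepA grid n r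
    unfold sepA sepBelowB
    by_cases hm : some "up" ∈ grid.getD (r + 1) []
    · rw [if_pos hm,
        if_neg (show ¬(r + 1 < grid.length ∧ ¬some "up" ∈ grid.getD (r + 1) []) from by
          rintro ⟨_, h2⟩; exact h2 hm),
        if_neg hend]
      have hs : startColLoopA (grid.getD (r + 1) []) n 0
          = runCnt "up" ((grid.getD (r + 1) []).take n) := by
        simpa using startColLoopA_eq (grid.getD (r + 1) []) n 0 hlen
      have hlast : lastColLoopA (grid.getD (r + 1) []) (n - 1)
          = n - 1 - min (runCnt "up" (((grid.getD (r + 1) []).take n).reverse)) (n - 1) := by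
        have h2 := lastColLoopA_eq (grid.getD (r + 1) []) (n - 1) (by omega)
        rwa [show n - 1 + 1 = n from by omega] at h2
      simp only [hs, hlast, leadUpB_eq]
    · rw [if_neg hm, if_pos ⟨hlt, hm⟩]

-- the string A appends for row i
def rowStrA (grid : List (List (Option String))) (n i : Nat) : String :=
  pyJoin " & " (cellsLoopA grid (grid.getD i []) i n 0) ++ " \\\\ " ++ sepA grid n i

theorem buildB_outs (grid : List (List (Option String))) (n : Nat)
    (hpre : ∀ row ∈ grid, n ≤ row.length) (hn : 1 ≤ n) :
    ∀ d r, grid.length - r ≤ d →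
      (buildB n (grid.drop r)).2.2
        = (List.range' r (grid.length - r)).map (rowStrA grid n) := by
  intro d
  induction d with
  | zero =>
    intro r hd
    rw [List.drop_of_length_le (by omega), show grid.length - r = 0 from by omega]
    rfl
  | succ d ih =>
    intro r hd
    by_cases hr : r < grid.length
    · have hmem : grid.getD r [] ∈ grid := by
        rw [List.getD_eq_getElem _ _ hr]; exact List.getElem_mem hr
      have hrow : n ≤ (grid.getD r []).length := hpre _ hmem
      rw [drop_eq_getD_cons grid r hr]
      show (PySem.Str.join " & " (cellsB 0 ((grid.getD r []).take n)
            (buildB n (grid.drop (r + 1))).1).2 ++ " \\\\ "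
            ++ (buildB n (grid.drop (r + 1))).2.1) :: (buildB n (grid.drop (r + 1))).2.2
          = (List.range' r (grid.length - r)).map (rowStrA grid n)
      rw [show grid.length - r = (grid.length - (r + 1)) + 1 from by omega, List.range'_succ,
        List.map_cons, ← ih (r + 1) (by omega)]
      congr 1
      unfold rowStrA
      rw [buildB_sep grid n hpre hn r hr]
      congr 2
      rw [pyJoin_eq]
      congr 1
      obtain ⟨_, hups⟩ := buildB_ups grid n hpre (grid.length - (r + 1)) (r + 1) (by omega)
      have hB := cellsB_snd (grid.getD r []) n hrow
        (fun c => runCnt "up" ((grid.map (fun row => row.getD c none)).drop (r + 1)))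
        n 0 (buildB n (grid.drop (r + 1))).1 (by omega)
        (by intro j hj; simpa using hups j (by omega))
      rw [show ((grid.getD r []).take n).drop 0 = (grid.getD r []).take n from rfl] at hB
      rw [cellsLoopA_eq grid (grid.getD r []) r n hrow 0, hB]
      apply List.filterMap_congr
      intro i hi
      have hin : i < n := by have := List.mem_range'_1.mp hi; omega
      cases hval : (grid.getD r []).getD i none with
      | none => rfl
      | some cell =>
        by_cases hup : cell = "up"
        · simp [hup]
        · by_cases hleft : cell = "left"
          · simp [hleft]
          · simp only [if_neg hup, if_neg hleft]
            rw [cellText_bridge, rowspanLoopA_eq,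
              colspanLoopA_eq (grid.getD r []) n i 1 hrow]
    · rw [List.drop_of_length_le (by omega), show grid.length - r = 0 from by omega]
      rfl

theorem pyJoin_empty_cons (x : String) (xs : List String) :
    pyJoin "" (x :: xs) = x ++ pyJoin "" xs := by
  cases xs <;> simp [pyJoin]

theorem rowsLoopA_eq (grid : List (List (Option String))) (n : Nat) (r : Nat) (acc : String) :
    rowsLoopA grid n r acc
      = acc ++ pyJoin "" ((List.range' r (grid.length - r)).map (rowStrA grid n)) := by
  fun_induction rowsLoopA with
  | case1 r acc h ih =>
    rw [ih,
      show grid.length - r = (grid.length - (r + 1)) + 1 from by omega,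
      List.range'_succ, List.map_cons, pyJoin_empty_cons]
    simp only [rowStrA, String.append_assoc]
  | case2 r acc h =>
    rw [show grid.length - r = 0 from by omega]
    simp [pyJoin]

-- ===== VERDICT (by name: the statement is the Claim_ definition above) =====
theorem array_to_latex_spec : Claim_equal_array_to_latex := by
  intro grid _ hpre
  unfold Spec_array_to_latex array_to_latex array_to_latex_alt
  split
  · rfl
  · next hne =>
    have hn : 1 ≤ (grid.headD []).length := by
      rcases grid with _ | ⟨h, t⟩
      · simp at hne
      · simp only [not_or, List.headD_cons] at hne ⊢
        cases h with
        | nil => simp at hne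
        | cons a b => simp
    rw [rowsLoopA_eq grid _ 0,
      show (buildB (grid.headD []).length grid).2.2
          = (buildB (grid.headD []).length (grid.drop 0)).2.2 from rfl,
      buildB_outs grid _ hpre hn grid.length 0 (by omega),
      pyJoin_eq "", pyJoin_eq "|"]
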